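-- pv_equiv track=rewrite | github.com/Brandon-Valley/exception_utils | exception_utils.py | formatsMatch
-- ===== SOURCE A (Python) =====
-- def formatsMatch(dataDict, csvData, headerList):
--     #if the csv is empty, no need for a backup
--     if csvData == []:
--         return True
--
--     # if you are trying to log data with a header that is not in the
--     # existing csv or in the given header list, return False
--     for header, data in dataDict.items():
--         if header not in csvData[0] and header not in headerList:
--             return False
--
--     # if you are trying to log data that does not have one of the headers
--     # that are already in the existing CSV, AND isn't in the headerList, return False
--     for header in csvData[0]:
--         if header not in dataDict.keys() and header not in headerList:
--             return False
--
--     return True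
-- ===== SOURCE B (Python) =====
-- def formatsMatch(dataDict, csvData, headerList):
--     if csvData == []:
--         return True
--     a = sorted(set(dataDict))
--     b = sorted(set(csvData[0]))
--     i = j = 0
--     sym = []
--     while i < len(a) and j < len(b):
--         if a[i] == b[j]:
--             i += 1
--             j += 1
--         elif a[i] < b[j]:
--             sym.append(a[i])
--             i += 1
--         else:
--             sym.append(b[j])
--             j += 1
--     sym += a[i:] + b[j:]
--     return all(h in headerList for h in sym)
-- ===== Notes on version B (the rewrite author's own statement) =====
-- stated objective: alternative
-- what changed: Instead of two element-wise scan-and-branch loops, B sorts the deduplicated dict keys and first csv row, computes their symmetric difference with a single two-pointer merge, and only checks those leftover headers against headerList.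
import Mathlib
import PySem

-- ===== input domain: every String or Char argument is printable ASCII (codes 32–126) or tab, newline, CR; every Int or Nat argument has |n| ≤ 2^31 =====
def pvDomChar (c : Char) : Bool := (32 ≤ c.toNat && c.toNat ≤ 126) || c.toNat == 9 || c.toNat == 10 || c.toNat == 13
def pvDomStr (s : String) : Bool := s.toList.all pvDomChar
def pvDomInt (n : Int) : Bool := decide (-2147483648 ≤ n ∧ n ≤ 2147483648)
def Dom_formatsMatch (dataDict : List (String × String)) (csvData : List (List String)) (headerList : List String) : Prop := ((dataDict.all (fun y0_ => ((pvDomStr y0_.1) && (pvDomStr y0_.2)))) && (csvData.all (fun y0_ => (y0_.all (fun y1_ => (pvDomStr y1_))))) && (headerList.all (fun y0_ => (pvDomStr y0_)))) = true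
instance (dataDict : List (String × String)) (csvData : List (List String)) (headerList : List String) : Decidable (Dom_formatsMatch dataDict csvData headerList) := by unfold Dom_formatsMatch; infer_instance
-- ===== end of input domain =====

-- B replaces A's two element-wise scan loops with a sort + two-pointer merge computing the
-- symmetric difference of the dict keys and the first csv row, then checks only those leftovers
-- against headerList (objective: alternative algorithm; same observable result).


-- ===== PORT A =====
-- Transliteration of A: the empty-csv guard, then two element-wise scan loops with early return False.
def formatsMatch (dataDict : List (String × String)) (csvData : List (List String)) (headerList : List String) : Bool :=
  match csvData with
  | [] => true
  | row :: _ =>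
    -- for header, data in dataDict.items(): early return False = any
    if dataDict.any (fun kv => !row.contains kv.1 && !headerList.contains kv.1) then false
    else if row.any (fun h => !(dataDict.map Prod.fst).contains h && !headerList.contains h) then false
    else true

-- ===== PORT B =====
-- The while loop of Source B over indices i, j: structural recursion over the two sorted lists;
-- the base cases are the trailing 'sym += a[i:] + b[j:]'.
def symMerge : List String → List String → List String
  | [], b => b
  | a, [] => a
  | x :: xs, y :: ys =>
    if x = y then symMerge xs ys
    else if x < y then x :: symMerge xs (y :: ys)
    else y :: symMerge (x :: xs) ys

-- B: sorted(set(..)) on both key collections, two-pointer merge for the symmetric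
-- difference, then all(h in headerList for h in sym).
def formatsMatch_alt (dataDict : List (String × String)) (csvData : List (List String)) (headerList : List String) : Bool :=
  match csvData with
  | [] => true
  | row :: _ =>
    let a := PySem.List.sorted (PySem.Set.ofList (dataDict.map Prod.fst)) (fun x => x) false
    let b := PySem.List.sorted (PySem.Set.ofList row) (fun x => x) false
    (symMerge a b).all (fun h => headerList.contains h)

-- ===== PRECONDITION & SPEC =====
def Spec_formatsMatch (dataDict : List (String × String)) (csvData : List (List String)) (headerList : List String) (out : Bool) : Prop := out = formatsMatch_alt dataDict csvData headerList
instance (dataDict : List (String × String)) (csvData : List (List String)) (headerList : List String) (out : Bool) : Decidable (Spec_formatsMatch dataDict csvData headerList out) := by unfold Spec_formatsMatch; infer_instance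

-- ===== CLAIM =====
def Claim_equal_formatsMatch : Prop := ∀ (dataDict : List (String × String)) (csvData : List (List String)) (headerList : List String), Dom_formatsMatch dataDict csvData headerList → Spec_formatsMatch dataDict csvData headerList (formatsMatch dataDict csvData headerList)

-- ===== LEMMAS AND PROOFS =====
-- On strictly sorted inputs, symMerge computes exactly the symmetric difference.
theorem mem_symMerge (a b : List String) (ha : a.Pairwise (· < ·)) (hb : b.Pairwise (· < ·))
    (z : String) : z ∈ symMerge a b ↔ (z ∈ a ∧ z ∉ b) ∨ (z ∈ b ∧ z ∉ a) := by
  fun_induction symMerge a b with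
  | case1 b => simp
  | case2 a h => simp
  | case3 xs y ys ih =>
    rcases List.pairwise_cons.mp ha with ⟨hax, ha'⟩
    rcases List.pairwise_cons.mp hb with ⟨hby, hb'⟩
    rw [ih ha' hb']
    by_cases hz : z = y
    · subst hz
      constructor
      · rintro (⟨h1, _⟩ | ⟨h1, _⟩)
        · exact absurd (hax z h1) (lt_irrefl z)
        · exact absurd (hby z h1) (lt_irrefl z)
      · rintro (⟨_, h2⟩ | ⟨_, h2⟩) <;> exact absurd List.mem_cons_self h2
    · simp [List.mem_cons, hz]
  | case4 x xs y ys hne hlt ih =>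
    rcases List.pairwise_cons.mp ha with ⟨hax, ha'⟩
    rw [List.mem_cons, ih ha' hb]
    by_cases hz : z = x
    · subst hz
      have hznb : z ∉ y :: ys := by
        intro h
        rcases List.mem_cons.mp h with h | h
        · exact hne h
        · exact absurd ((List.pairwise_cons.mp hb).1 z h) (not_lt.mpr (le_of_lt hlt))
      have hzxs : z ∉ xs := fun h => lt_irrefl z (hax z h)
      simp [hznb, hzxs]
    · have hmem : z ∈ x :: xs ↔ z ∈ xs := by simp [List.mem_cons, hz]
      simp only [hz, false_or, hmem]
  | case5 x xs y ys hne hnlt ih =>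
    rcases List.pairwise_cons.mp hb with ⟨hby, hb'⟩
    rw [List.mem_cons, ih ha hb']
    have hgt : y < x := by
      rcases lt_trichotomy x y with h | h | h
      · exact absurd h hnlt
      · exact absurd h hne
      · exact h
    by_cases hz : z = y
    · subst hz
      have hzna : z ∉ x :: xs := by
        intro h
        rcases List.mem_cons.mp h with h | h
        · exact hne h.symm
        · exact absurd ((List.pairwise_cons.mp ha).1 z h) (not_lt.mpr (le_of_lt hgt))
      have hzys : z ∉ ys := fun h => lt_irrefl z (hby z h)
      simp [hzna, hzys]
    · have hmem : z ∈ y :: ys ↔ z ∈ ys := by simp [List.mem_cons, hz]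
      simp only [hz, false_or, hmem]

theorem ite_chain (a b : Bool) :
    (if a = true then false else if b = true then false else true) = (!a && !b) := by
  cases a <;> cases b <;> simp

-- ===== VERDICT =====
theorem formatsMatch_spec : Claim_equal_formatsMatch := by
  intro dataDict csvData headerList _
  unfold Spec_formatsMatch
  cases csvData with
  | nil => rfl
  | cons row rest =>
    have ha := PySem.List.sorted_ofList_pairwise_lt (xs := dataDict.map Prod.fst) (κ := String)
    have hb := PySem.List.sorted_ofList_pairwise_lt (xs := row) (κ := String)
    have hsym : ∀ z, z ∈ symMerge
        (PySem.List.sorted (PySem.Set.ofList (dataDict.map Prod.fst)) (fun x => x) false)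
        (PySem.List.sorted (PySem.Set.ofList row) (fun x => x) false) ↔
        (z ∈ dataDict.map Prod.fst ∧ z ∉ row) ∨ (z ∈ row ∧ z ∉ dataDict.map Prod.fst) := by
      intro z
      rw [mem_symMerge _ _ ha hb]
      simp [PySem.List.mem_sorted, PySem.Set.mem_ofList]
    show formatsMatch dataDict (row :: rest) headerList = _
    rw [show formatsMatch dataDict (row :: rest) headerList =
        (!(dataDict.any fun kv => !row.contains kv.1 && !headerList.contains kv.1) &&
         !(row.any fun h => !(dataDict.map Prod.fst).contains h && !headerList.contains h))
      from ite_chain _ _]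
    rw [Bool.eq_iff_iff]
    simp only [formatsMatch_alt, List.all_eq_true]
    simp [List.contains_eq_mem, hsym]
    constructor
    · rintro ⟨h1, h2⟩ x hx
      rcases hx with ⟨⟨y, hy⟩, hnr⟩ | ⟨hr, hnk⟩
      · exact h1 x y hy hnr
      · exact h2 x hr hnk
    · intro h
      exact ⟨fun a b hab hnr => h a (Or.inl ⟨⟨b, hab⟩, hnr⟩),
             fun x hx hnk => h x (Or.inr ⟨hx, hnk⟩)⟩
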